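-- pv_equiv track=rewrite | github.com/denis-verkholantsev/FSM | pushdown_automaton/pda.py | pda
-- ===== SOURCE A (Python) =====
-- def pda(string):
--     stack = ['X']  # Z_0 = X - маркер дна
--     cond = ['q_0', 'q_1', 'q_2', 'q_3', 'q_4', 'q_5']
--     # начальное состояние
--     q = cond[0]
--     # Номер дельта-функции перед каждым условием
--     # Иду с начала строки до первой ошибки или до конца
--     for i in range(len(string)):
--         # 1
--         if q == cond[0] and string[i] == 'x' and stack[-1] == 'X':
--             stack.pop()
--             stack.extend('X11')  # кладу символы наоборот, так как вершина стека в конце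
--             q = cond[1]
--         # 2
--         elif q == cond[1] and string[i] == 'x' and stack[-1] == '1':
--             stack.pop()
--             stack.extend('111')  # кладу символы наоборот, так как вершина стека в конце
--         # 3
--         elif q == cond[1] and string[i] == 'y' and stack[-1] == '1':
--             stack.pop()
--             q = cond[2]
--         # 4
--         elif q == cond[2] and string[i] == 'y' and stack[-1] == '1':
--             stack.pop()
--         # 6, 7
--         elif (q == cond[0] or q == cond[2]) and string[i] == 'z' and stack[-1] == 'X':
--             stack.pop()
--             stack.extend('X1')  # кладу символы наоборот, так как вершина стека в конце
--             q = cond[3]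
--         # 8
--         elif q == cond[3] and string[i] == 'z' and stack[-1] == '1':
--             stack.pop()
--             stack.extend('2')
--             q = cond[3]
--         # 9
--         elif q == cond[3] and string[i] == 'z' and stack[-1] == '2':
--             stack.pop()
--             stack.extend('3')
--         # 10
--         elif q == cond[3] and string[i] == 'z' and stack[-1] == '3':
--             stack.pop()
--             stack.extend('31')  # кладу символы наоборот, так как вершина стека в конце
--         # 11
--         elif q == cond[3] and string[i] == 'x' and stack[-1] == '3':
--             stack.pop()
--             q = cond[4]
--         # 12
--         elif q == cond[4] and string[i] == 'x' and stack[-1] == '3':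
--             stack.pop()
--         else:
--             return f'Ошибка: в позиции {i+1}, неожидаемый символ {string[i]}'
--             break
--     if len(stack) != 1:
--         return 'Ошибка: неожидаемый конец строки'
--     else:
--         return 'Цепочка принадлежит языку'
-- ===== SOURCE B (Python) =====
-- def pda(string):
--     # Counter machine: the PDA's stack is always X, X 1^k, X 3^a t (t in {1,2,3}),
--     # or X 3^a, so two integers and a one-char tag replace the stack entirely.
--     q = 0
--     ones = 0
--     threes = 0
--     t = ''
--     for i in range(len(string)):
--         ch = string[i]
--         if q == 0 and ch == 'x':
--             q = 1
--             ones = 2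
--         elif q == 0 and ch == 'z':
--             q = 3
--             threes = 0
--             t = '1'
--         elif q == 1 and ch == 'x':
--             ones += 2
--         elif q == 1 and ch == 'y':
--             ones -= 1
--             q = 2
--         elif q == 2 and ch == 'y' and ones > 0:
--             ones -= 1
--         elif q == 2 and ch == 'z' and ones == 0:
--             q = 3
--             threes = 0
--             t = '1'
--         elif q == 3 and ch == 'z':
--             if t == '1':
--                 t = '2'
--             elif t == '2':
--                 t = '3'
--             else:
--                 threes += 1
--                 t = '1'
--         elif q == 3 and ch == 'x' and t == '3':
--             q = 4
--         elif q == 4 and ch == 'x' and threes > 0: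
--             threes -= 1
--         else:
--             return f'Ошибка: в позиции {i+1}, неожидаемый символ {ch}'
--     if q == 0 or (q == 2 and ones == 0) or (q == 4 and threes == 0):
--         return 'Цепочка принадлежит языку'
--     return 'Ошибка: неожидаемый конец строки'
-- ===== Notes on version B (the rewrite author's own statement) =====
-- stated objective: alternative
-- what changed: The explicit pushdown stack is eliminated: since the reachable stack contents are always X, X 1^k, X 3^a t or X 3^a, B runs a counter machine over two integers and a one-char tag instead of simulating list push/pop/extend, with the acceptance check becoming a condition on the phase and its counter.
import Mathlib
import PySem

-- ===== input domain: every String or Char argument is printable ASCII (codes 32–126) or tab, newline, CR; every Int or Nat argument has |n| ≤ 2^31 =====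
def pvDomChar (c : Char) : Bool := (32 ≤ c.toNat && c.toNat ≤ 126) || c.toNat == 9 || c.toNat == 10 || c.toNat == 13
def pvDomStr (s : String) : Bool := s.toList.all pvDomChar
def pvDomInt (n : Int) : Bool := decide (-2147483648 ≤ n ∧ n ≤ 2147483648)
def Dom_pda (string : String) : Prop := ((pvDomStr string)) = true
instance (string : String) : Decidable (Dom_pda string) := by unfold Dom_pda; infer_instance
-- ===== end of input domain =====

-- B replaces the simulated pushdown stack by a counter machine (two integers and a
-- one-char tag), exploiting that the reachable stack contents are always X, X 1^k,
-- X 3^a t or X 3^a (objective: alternative; same values, O(1) space).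

-- ===== PORT A =====
-- Literal port of A's for-loop: index i, state q, stack with top at the END (Python list),
-- stack.pop() = dropLast, stack.extend(s) = ++ s.toList, stack[-1] = PySem.List.pyGet? stack (-1).
def pdaLoopA (l : List Char) (i : Int) (q : String) (stack : List Char) : String :=
  match l with
  | [] =>
    if stack.length ≠ 1 then "Ошибка: неожидаемый конец строки"
    else "Цепочка принадлежит языку"
  | c :: rest =>
    if q = "q_0" ∧ c = 'x' ∧ PySem.List.pyGet? stack (-1) = some 'X' then
      pdaLoopA rest (i+1) "q_1" (stack.dropLast ++ "X11".toList)
    else if q = "q_1" ∧ c = 'x' ∧ PySem.List.pyGet? stack (-1) = some '1' then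
      pdaLoopA rest (i+1) q (stack.dropLast ++ "111".toList)
    else if q = "q_1" ∧ c = 'y' ∧ PySem.List.pyGet? stack (-1) = some '1' then
      pdaLoopA rest (i+1) "q_2" stack.dropLast
    else if q = "q_2" ∧ c = 'y' ∧ PySem.List.pyGet? stack (-1) = some '1' then
      pdaLoopA rest (i+1) q stack.dropLast
    else if (q = "q_0" ∨ q = "q_2") ∧ c = 'z' ∧ PySem.List.pyGet? stack (-1) = some 'X' then
      pdaLoopA rest (i+1) "q_3" (stack.dropLast ++ "X1".toList)
    else if q = "q_3" ∧ c = 'z' ∧ PySem.List.pyGet? stack (-1) = some '1' then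
      pdaLoopA rest (i+1) "q_3" (stack.dropLast ++ "2".toList)
    else if q = "q_3" ∧ c = 'z' ∧ PySem.List.pyGet? stack (-1) = some '2' then
      pdaLoopA rest (i+1) q (stack.dropLast ++ "3".toList)
    else if q = "q_3" ∧ c = 'z' ∧ PySem.List.pyGet? stack (-1) = some '3' then
      pdaLoopA rest (i+1) q (stack.dropLast ++ "31".toList)
    else if q = "q_3" ∧ c = 'x' ∧ PySem.List.pyGet? stack (-1) = some '3' then
      pdaLoopA rest (i+1) "q_4" stack.dropLast
    else if q = "q_4" ∧ c = 'x' ∧ PySem.List.pyGet? stack (-1) = some '3' then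
      pdaLoopA rest (i+1) q stack.dropLast
    else
      "Ошибка: в позиции " ++ PySem.Int.toStr (i+1) ++ ", неожидаемый символ " ++ String.ofList [c]

def pda (string : String) : String := pdaLoopA string.toList 0 "q_0" ['X']

-- ===== PORT B =====
-- Literal port of Source B's counter-machine loop: phase q, counters ones/threes, tag t.
def pdaLoopB (l : List Char) (i : Int) (q : Int) (ones : Int) (threes : Int) (t : String) : String :=
  match l with
  | [] =>
    if q = 0 ∨ (q = 2 ∧ ones = 0) ∨ (q = 4 ∧ threes = 0) then "Цепочка принадлежит языку"
    else "Ошибка: неожидаемый конец строки"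
  | c :: rest =>
    if q = 0 ∧ c = 'x' then pdaLoopB rest (i+1) 1 2 threes t
    else if q = 0 ∧ c = 'z' then pdaLoopB rest (i+1) 3 ones 0 "1"
    else if q = 1 ∧ c = 'x' then pdaLoopB rest (i+1) q (ones + 2) threes t
    else if q = 1 ∧ c = 'y' then pdaLoopB rest (i+1) 2 (ones - 1) threes t
    else if q = 2 ∧ c = 'y' ∧ 0 < ones then pdaLoopB rest (i+1) q (ones - 1) threes t
    else if q = 2 ∧ c = 'z' ∧ ones = 0 then pdaLoopB rest (i+1) 3 ones 0 "1"
    else if q = 3 ∧ c = 'z' then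
      if t = "1" then pdaLoopB rest (i+1) q ones threes "2"
      else if t = "2" then pdaLoopB rest (i+1) q ones threes "3"
      else pdaLoopB rest (i+1) q ones (threes + 1) "1"
    else if q = 3 ∧ c = 'x' ∧ t = "3" then pdaLoopB rest (i+1) 4 ones threes t
    else if q = 4 ∧ c = 'x' ∧ 0 < threes then pdaLoopB rest (i+1) q ones (threes - 1) t
    else
      "Ошибка: в позиции " ++ PySem.Int.toStr (i+1) ++ ", неожидаемый символ " ++ String.ofList [c]

def pda_alt (string : String) : String := pdaLoopB string.toList 0 0 0 0 ""

-- ===== PRECONDITION & SPEC =====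
def Spec_pda (string : String) (out : String) : Prop := out = pda_alt string
instance (string : String) (out : String) : Decidable (Spec_pda string out) := by unfold Spec_pda; infer_instance

-- ===== CLAIM (what is proved, stated in full; the proofs are below) =====
def Claim_equal_pda : Prop := ∀ (string : String), Dom_pda string → Spec_pda string (pda string)

-- ===== LEMMAS AND PROOFS =====

-- Invariant linking B's counters to the shape of A's reachable stacks.
def PdaInv (q ones threes : Int) (t : String) (qA : String) (st : List Char) : Prop :=
    (q = 0 ∧ qA = "q_0" ∧ st = ['X'])
  ∨ (∃ k : Nat, 1 ≤ k ∧ q = 1 ∧ ones = (k : Int) ∧ qA = "q_1" ∧ st = 'X' :: List.replicate k '1')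
  ∨ (∃ k : Nat, q = 2 ∧ ones = (k : Int) ∧ qA = "q_2" ∧ st = 'X' :: List.replicate k '1')
  ∨ (∃ a : Nat, q = 3 ∧ threes = (a : Int) ∧ t = "1" ∧ qA = "q_3" ∧ st = ('X' :: List.replicate a '3') ++ ['1'])
  ∨ (∃ a : Nat, q = 3 ∧ threes = (a : Int) ∧ t = "2" ∧ qA = "q_3" ∧ st = ('X' :: List.replicate a '3') ++ ['2'])
  ∨ (∃ a : Nat, q = 3 ∧ threes = (a : Int) ∧ t = "3" ∧ qA = "q_3" ∧ st = ('X' :: List.replicate a '3') ++ ['3'])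
  ∨ (∃ a : Nat, q = 4 ∧ threes = (a : Int) ∧ qA = "q_4" ∧ st = 'X' :: List.replicate a '3')

lemma pvRepSucc (ch : Char) (m : Nat) :
    'X' :: List.replicate (m + 1) ch = 'X' :: (List.replicate m ch ++ [ch]) := by
  simp [List.replicate_succ']

lemma pvRep3 (m : Nat) :
    'X' :: (List.replicate m '1' ++ ['1', '1', '1']) = 'X' :: List.replicate (m + 3) '1' := by
  simp [List.replicate_add]

lemma pvRep31 (a : Nat) :
    'X' :: (List.replicate a '3' ++ ['3', '1']) = 'X' :: (List.replicate (a + 1) '3' ++ ['1']) := by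
  simp [List.replicate_succ']

lemma pvTopX : PySem.List.pyGet? ['X'] (-1) = some 'X' := rfl

lemma pvTopCons (x : Char) (l : List Char) (c : Char) :
    PySem.List.pyGet? (x :: (l ++ [c])) (-1) = some c := by
  rw [← List.cons_append]
  exact PySem.List.pyGet?_neg_one_append_singleton _ _

lemma pvDropCons (x : Char) (l : List Char) (c : Char) :
    (x :: (l ++ [c])).dropLast = x :: l := by
  rw [← List.cons_append, List.dropLast_concat]

lemma pvLits : ("X11".toList = ['X','1','1']) ∧ ("111".toList = ['1','1','1']) ∧
    ("X1".toList = ['X','1']) ∧ ("2".toList = ['2']) ∧ ("3".toList = ['3']) ∧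
    ("31".toList = ['3','1']) := by decide

lemma pda_loop_eq (l : List Char) : ∀ (i q ones threes : Int) (t qA : String) (st : List Char),
    PdaInv q ones threes t qA st → pdaLoopA l i qA st = pdaLoopB l i q ones threes t := by
  induction l with
  | nil =>
    rintro i q ones threes t qA st
      (⟨rfl,rfl,rfl⟩ | ⟨k,hk,rfl,rfl,rfl,rfl⟩ | ⟨k,rfl,rfl,rfl,rfl⟩ |
       ⟨a,rfl,rfl,rfl,rfl,rfl⟩ | ⟨a,rfl,rfl,rfl,rfl,rfl⟩ | ⟨a,rfl,rfl,rfl,rfl,rfl⟩ |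
       ⟨a,rfl,rfl,rfl,rfl⟩) <;>
    · simp [pdaLoopA, pdaLoopB]
      try omega
  | cons c rest ih =>
    rintro i q ones threes t qA st
      (⟨rfl,rfl,rfl⟩ | ⟨k,hk,rfl,rfl,rfl,rfl⟩ | ⟨k,rfl,rfl,rfl,rfl⟩ |
       ⟨a,rfl,rfl,rfl,rfl,rfl⟩ | ⟨a,rfl,rfl,rfl,rfl,rfl⟩ | ⟨a,rfl,rfl,rfl,rfl,rfl⟩ |
       ⟨a,rfl,rfl,rfl,rfl⟩)
    · -- q0, stack ['X']
      by_cases hx : c = 'x'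
      · subst hx
        simp [pdaLoopA, pdaLoopB, pvLits]
        exact ih _ _ _ _ _ _ _ (Or.inr (Or.inl ⟨2, by omega, rfl, rfl, rfl, rfl⟩))
      · by_cases hz : c = 'z'
        · subst hz
          simp [pdaLoopA, pdaLoopB, pvLits]
          exact ih _ _ _ _ _ _ _ (Or.inr (Or.inr (Or.inr (Or.inl ⟨0, rfl, rfl, rfl, rfl, rfl⟩))))
        · simp [pdaLoopA, pdaLoopB, pvTopX, hx, hz]
    · -- q1, stack X 1^(m+1)
      obtain ⟨m, rfl⟩ : ∃ m, k = m + 1 := ⟨k - 1, by omega⟩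
      rw [pvRepSucc '1' m]
      by_cases hx : c = 'x'
      · subst hx
        simp [pdaLoopA, pdaLoopB, pvLits, pvTopCons, pvDropCons]
        rw [pvRep3 m]
        refine ih _ _ _ _ _ _ _ (Or.inr (Or.inl ⟨m + 3, by omega, rfl, ?_, rfl, rfl⟩))
        omega
      · by_cases hy : c = 'y'
        · subst hy
          simp [pdaLoopA, pdaLoopB, pvTopCons, pvDropCons]
          refine ih _ _ _ _ _ _ _ (Or.inr (Or.inr (Or.inl ⟨m, rfl, ?_, rfl, rfl⟩)))
          omega
        · simp [pdaLoopA, pdaLoopB, pvTopCons, hx, hy]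
    · -- q2, stack X 1^k
      rcases k with _ | m
      · -- k = 0, stack ['X']
        by_cases hz : c = 'z'
        · subst hz
          simp [pdaLoopA, pdaLoopB, pvLits]
          exact ih _ _ _ _ _ _ _ (Or.inr (Or.inr (Or.inr (Or.inl ⟨0, rfl, rfl, rfl, rfl, rfl⟩))))
        · simp [pdaLoopA, pdaLoopB, pvTopX, hz]
      · rw [pvRepSucc '1' m]
        by_cases hy : c = 'y'
        · subst hy
          simp [pdaLoopA, pdaLoopB, pvTopCons, pvDropCons]
          refine ih _ _ _ _ _ _ _ (Or.inr (Or.inr (Or.inl ⟨m, rfl, ?_, rfl, rfl⟩)))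
          omega
        · simp [pdaLoopA, pdaLoopB, pvTopCons, hy]
          intro h
          omega
    · -- q3, t = "1", stack X 3^a 1
      by_cases hz : c = 'z'
      · subst hz
        simp [pdaLoopA, pdaLoopB, pvLits, pvTopCons, pvDropCons]
        exact ih _ _ _ _ _ _ _
          (Or.inr (Or.inr (Or.inr (Or.inr (Or.inl ⟨a, rfl, rfl, rfl, rfl, rfl⟩)))))
      · simp [pdaLoopA, pdaLoopB, pvTopCons, hz]
    · -- q3, t = "2", stack X 3^a 2
      by_cases hz : c = 'z'
      · subst hz
        simp [pdaLoopA, pdaLoopB, pvLits, pvTopCons, pvDropCons]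
        exact ih _ _ _ _ _ _ _
          (Or.inr (Or.inr (Or.inr (Or.inr (Or.inr (Or.inl ⟨a, rfl, rfl, rfl, rfl, rfl⟩))))))
      · simp [pdaLoopA, pdaLoopB, pvTopCons, hz]
    · -- q3, t = "3", stack X 3^a 3
      by_cases hz : c = 'z'
      · subst hz
        simp [pdaLoopA, pdaLoopB, pvLits, pvTopCons, pvDropCons]
        rw [pvRep31 a]
        refine ih _ _ _ _ _ _ _
          (Or.inr (Or.inr (Or.inr (Or.inl ⟨a + 1, rfl, ?_, rfl, rfl, rfl⟩))))
        omega
      · by_cases hx : c = 'x'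
        · subst hx
          simp [pdaLoopA, pdaLoopB, pvTopCons, pvDropCons]
          exact ih _ _ _ _ _ _ _
            (Or.inr (Or.inr (Or.inr (Or.inr (Or.inr (Or.inr ⟨a, rfl, rfl, rfl, rfl⟩))))))
        · simp [pdaLoopA, pdaLoopB, pvTopCons, hz, hx]
    · -- q4, stack X 3^a
      rcases a with _ | m
      · simp [pdaLoopA, pdaLoopB, pvTopX]
      · rw [pvRepSucc '3' m]
        by_cases hx : c = 'x'
        · subst hx
          simp [pdaLoopA, pdaLoopB, pvTopCons, pvDropCons]
          refine ih _ _ _ _ _ _ _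
            (Or.inr (Or.inr (Or.inr (Or.inr (Or.inr (Or.inr ⟨m, rfl, ?_, rfl, rfl⟩))))))
          omega
        · simp [pdaLoopA, pdaLoopB, pvTopCons, hx]

-- ===== VERDICT (by name: the statement is the Claim_ definition above) =====
theorem pda_spec : Claim_equal_pda := by
  intro s _
  unfold Spec_pda pda pda_alt
  exact pda_loop_eq _ 0 0 0 0 "" "q_0" ['X'] (Or.inl ⟨rfl, rfl, rfl⟩)
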